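-- pv_equiv track=rewrite | github.com/binbin26/AI-Project | algorithms/common.py | build_sequential_schedule
-- ===== SOURCE A (Python) =====
-- from typing import Any, Dict, List
--
-- def build_sequential_schedule(processing: List[List[int]]) -> List[Dict[str, int]]:
--     jobs = len(processing)
--     machines = len(processing[0]) if jobs > 0 else 0
--     machine_avail = [0] * machines
--     job_avail = [0] * jobs
--     schedule: List[Dict[str, int]] = []
--     for j in range(jobs):
--         for m in range(machines):
--             d = int(processing[j][m])
--             s = max(machine_avail[m], job_avail[j])
--             schedule.append({'job': j, 'machine': m, 'start': s, 'duration': d})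
--             machine_avail[m] = s + d
--             job_avail[j] = s + d
--     return schedule
-- ===== SOURCE B (Python) =====
-- from typing import Dict, List
--
-- def build_sequential_schedule(processing: List[List[int]]) -> List[Dict[str, int]]:
--     jobs = len(processing)
--     machines = len(processing[0]) if jobs > 0 else 0
--     # Operations (j, m) form a precedence DAG: (j, m) waits for (j-1, m) and (j, m-1).
--     # List-schedule the DAG with Kahn's algorithm over indegrees; an operation starts
--     # when its last predecessor finishes.
--     indeg = {(j, m): (j > 0) + (m > 0) for j in range(jobs) for m in range(machines)}
--     ready = [op for op, deg in indeg.items() if deg == 0]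
--     finish: Dict[tuple, int] = {}
--     for j, m in ready:  # `ready` grows as successors lose their last dependency
--         s = max(finish.get((j - 1, m), 0), finish.get((j, m - 1), 0))
--         finish[(j, m)] = s + int(processing[j][m])
--         for succ in ((j + 1, m), (j, m + 1)):
--             if succ in indeg:
--                 indeg[succ] -= 1
--                 if indeg[succ] == 0:
--                     ready.append(succ)
--     return [{'job': j, 'machine': m,
--              'start': finish[(j, m)] - int(processing[j][m]),
--              'duration': int(processing[j][m])}
--             for j in range(jobs) for m in range(machines)]
-- ===== Notes on version B (the rewrite author's own statement) =====
-- stated objective: alternative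
-- what changed: B treats the operations as a precedence DAG ((j,m) waits for (j-1,m) and (j,m-1)) and list-schedules it with Kahn's algorithm: an indegree dict, a growing ready worklist and a finish-time dict, then emits the schedule job-major from the finish dict; A instead runs fixed nested j/m loops with two rolling availability arrays.
import Mathlib
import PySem

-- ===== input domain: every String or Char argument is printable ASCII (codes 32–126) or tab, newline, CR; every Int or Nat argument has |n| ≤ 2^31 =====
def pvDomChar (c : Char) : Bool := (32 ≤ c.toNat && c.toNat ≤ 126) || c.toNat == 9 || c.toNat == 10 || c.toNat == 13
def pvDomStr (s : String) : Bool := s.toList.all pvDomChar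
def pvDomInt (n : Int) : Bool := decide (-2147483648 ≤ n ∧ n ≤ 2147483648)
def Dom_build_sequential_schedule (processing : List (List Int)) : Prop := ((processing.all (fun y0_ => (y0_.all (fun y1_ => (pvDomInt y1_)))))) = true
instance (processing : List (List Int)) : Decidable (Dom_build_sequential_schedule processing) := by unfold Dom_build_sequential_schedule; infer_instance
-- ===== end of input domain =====

-- B replaces A's fixed nested j/m loops with rolling availability arrays by Kahn's
-- algorithm on the precedence DAG of operations (indegree dict + growing ready worklist
-- + finish-time dict), emitting the schedule job-major from the finish dict at the end.

-- ===== PORT A =====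
-- List indexing is ported with getD; it is exact because Pre_ guarantees every access
-- processing[j][m] (j < jobs, m < machines ≤ row length), machine_avail[m], job_avail[j]
-- is in range.
def aStep (processing : List (List Int)) (j : Nat)
    (acc : List Int × List Int × List (List (String × Int))) (m : Nat) :
    List Int × List Int × List (List (String × Int)) :=
  let d := (processing.getD j []).getD m 0
  let s := max (acc.1.getD m 0) (acc.2.1.getD j 0)
  (acc.1.set m (s + d), acc.2.1.set j (s + d),
   acc.2.2 ++ [[("job", (j : Int)), ("machine", (m : Int)), ("start", s), ("duration", d)]])

def aInner (processing : List (List Int)) (j machines : Nat)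
    (acc : List Int × List Int × List (List (String × Int))) :
    List Int × List Int × List (List (String × Int)) :=
  (List.range machines).foldl (aStep processing j) acc

def build_sequential_schedule (processing : List (List Int)) : List (List (String × Int)) :=
  let jobs := processing.length
  let machines := if jobs > 0 then (processing.getD 0 []).length else 0
  ((List.range jobs).foldl (fun acc j => aInner processing j machines acc)
    (List.replicate machines (0 : Int), List.replicate jobs (0 : Int), [])).2.2

-- ===== PORT B =====
-- indeg = {(j, m): (j > 0) + (m > 0) for j in range(jobs) for m in range(machines)}
def bIndeg (jobs machines : Nat) : PySem.Dict (Int × Int) Int :=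
  (List.range jobs).foldl (fun d (j : Nat) =>
    (List.range machines).foldl (fun d (m : Nat) =>
      d.insert ((j : Int), (m : Int)) ((if j > 0 then 1 else 0) + (if m > 0 then 1 else 0))) d)
    PySem.Dict.empty

-- body of the `for succ in ((j+1, m), (j, m+1))` loop: if succ in indeg, decrement it,
-- and append succ to ready when the decremented indegree is 0
def bSucc (st : PySem.Dict (Int × Int) Int × List (Int × Int)) (succ : Int × Int) :
    PySem.Dict (Int × Int) Int × List (Int × Int) :=
  if st.1.contains succ then
    let indeg' := st.1.modify succ 0 (· - 1)
    if indeg'.getD succ 0 == 0 then (indeg', st.2 ++ [succ]) else (indeg', st.2)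
  else st

-- the `for j, m in ready:` loop (ready grows while iterated), as recursion on fuel.
-- fuel only makes the loop total: jobs*machines bounds the number of iterations, since
-- every operation is appended to `ready` at most once; the loop condition itself is
-- i < ready.length, exactly as in Python.
-- Grid keys have nonnegative components, so .toNat indexing of `processing` is exact.
def kahnRun (processing : List (List Int)) :
    Nat → Nat → PySem.Dict (Int × Int) Int → PySem.Dict (Int × Int) Int →
    List (Int × Int) → PySem.Dict (Int × Int) Int
  | 0, _, _, finish, _ => finish
  | fuel + 1, i, indeg, finish, ready =>
    if h : i < ready.length then
      let op := ready[i]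
      let s := max (finish.getD (op.1 - 1, op.2) 0) (finish.getD (op.1, op.2 - 1) 0)
      let d := (processing.getD op.1.toNat []).getD op.2.toNat 0
      let finish' := finish.insert op (s + d)
      let st := [(op.1 + 1, op.2), (op.1, op.2 + 1)].foldl bSucc (indeg, ready)
      kahnRun processing fuel (i + 1) st.1 finish' st.2
    else finish

def build_sequential_schedule_alt (processing : List (List Int)) : List (List (String × Int)) :=
  let jobs := processing.length
  let machines := if jobs > 0 then (processing.getD 0 []).length else 0
  let indeg := bIndeg jobs machines
  let ready := (indeg.items.filter (fun kv => kv.2 == 0)).map (fun kv => kv.1)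
  let finish := kahnRun processing (jobs * machines) 0 indeg PySem.Dict.empty ready
  (List.range jobs).flatMap (fun j =>
    (List.range machines).map (fun m =>
      let d := (processing.getD j []).getD m 0
      [("job", (j : Int)), ("machine", (m : Int)),
       ("start", finish.getD ((j : Int), (m : Int)) 0 - d), ("duration", d)]))

-- ===== PRECONDITION & SPEC =====
-- Pre_ excludes exactly the ragged inputs on which Python A raises IndexError
-- (a row shorter than the first row); B raises there as well.
def Pre_build_sequential_schedule (processing : List (List Int)) : Prop :=
  ∀ r ∈ processing, (processing.getD 0 []).length ≤ r.length

instance (processing : List (List Int)) : Decidable (Pre_build_sequential_schedule processing) := by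
  unfold Pre_build_sequential_schedule; infer_instance

def pvWitness_build_sequential_schedule : List (List Int) := [[2, 3], [1, 4]]

def Spec_build_sequential_schedule (processing : List (List Int)) (out : List (List (String × Int))) : Prop := out = build_sequential_schedule_alt processing
instance (processing : List (List Int)) (out : List (List (String × Int))) : Decidable (Spec_build_sequential_schedule processing out) := by unfold Spec_build_sequential_schedule; infer_instance

-- ===== CLAIM (what is proved, stated in full; the proofs are below) =====
def Claim_equal_build_sequential_schedule : Prop := ∀ (processing : List (List Int)), Dom_build_sequential_schedule processing → Pre_build_sequential_schedule processing → Spec_build_sequential_schedule processing (build_sequential_schedule processing)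

-- ===== LEMMAS AND PROOFS =====

lemma getD_set_self {α : Type} (l : List α) (i : Nat) (v d : α) (h : i < l.length) :
    (l.set i v).getD i d = v := by simp [List.getD, h]
lemma getD_set_ne {α : Type} (l : List α) (i j : Nat) (v d : α) (h : i ≠ j) :
    (l.set i v).getD j d = l.getD j d := by simp [List.getD, List.getElem?_set_ne, h]
lemma getD_append_left {α : Type} (l₁ l₂ : List α) (i : Nat) (d : α) (h : i < l₁.length) :
    (l₁ ++ l₂).getD i d = l₁.getD i d := by simp [List.getD, List.getElem?_append_left, h]
lemma getD_append_last {α : Type} (l₁ : List α) (a d : α) :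
    (l₁ ++ [a]).getD l₁.length d = a := by simp [List.getD]
lemma getD_replicate0 (n m : Nat) : (List.replicate n (0 : Int)).getD m 0 = 0 := by
  simp [List.getD, List.getElem?_replicate]; split <;> simp
lemma getD_oob {α : Type} (l : List α) (m : Nat) (d : α) (h : l.length ≤ m) : l.getD m d = d := by
  simp [List.getD, List.getElem?_eq_none h]

-- proof-side specification of the completion times: the same table A's loop fills,
-- row by row (bRow builds one row left-to-right; bTable chains the rows)
def bStep (pr prev : List Int) (acc : List Int × Int) (m : Nat) : List Int × Int :=
  let c := max (prev.getD m 0) acc.2 + pr.getD m 0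
  (acc.1 ++ [c], c)

def bRow (pr prev : List Int) (machines : Nat) : List Int × Int :=
  (List.range machines).foldl (bStep pr prev) ([], 0)

def bTable (processing : List (List Int)) (machines jn : Nat) : List (List Int) × List Int :=
  (List.range jn).foldl
    (fun acc j =>
      let row := (bRow (processing.getD j []) acc.2 machines).1
      (acc.1 ++ [row], row))
    ([], [])

-- the completion-time row for job j
def rowOf (processing : List (List Int)) (machines j : Nat) : List Int :=
  (bRow (processing.getD j []) (bTable processing machines j).2 machines).1

lemma bRow_length (pr prev : List Int) (k : Nat) : (bRow pr prev k).1.length = k := by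
  induction k with
  | zero => rfl
  | succ k ih =>
    simp only [bRow, List.range_succ, List.foldl_append, List.foldl_cons, List.foldl_nil] at *
    simp [bStep, ih]

lemma bRow_succ (pr prev : List Int) (k : Nat) :
    (bRow pr prev (k + 1)).1 = (bRow pr prev k).1 ++ [(bRow pr prev (k + 1)).2] := by
  simp only [bRow, List.range_succ, List.foldl_append, List.foldl_cons, List.foldl_nil]
  rfl

lemma bRow_val_succ (pr prev : List Int) (k : Nat) :
    (bRow pr prev (k + 1)).2 = max (prev.getD k 0) (bRow pr prev k).2 + pr.getD k 0 := by
  simp only [bRow, List.range_succ, List.foldl_append, List.foldl_cons, List.foldl_nil]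
  rfl

lemma bRow_getD_mono (pr prev : List Int) (k m : Nat) (h : m < k) :
    (bRow pr prev (k + 1)).1.getD m 0 = (bRow pr prev k).1.getD m 0 := by
  rw [bRow_succ]
  exact getD_append_left _ _ _ _ (by rw [bRow_length]; exact h)

lemma bRow_getD_last (pr prev : List Int) (k : Nat) :
    (bRow pr prev (k + 1)).1.getD k 0 = (bRow pr prev (k + 1)).2 := by
  rw [bRow_succ]
  generalize (bRow pr prev (k + 1)).2 = c
  have hl := bRow_length pr prev k
  generalize hL : (bRow pr prev k).1 = L at hl ⊢
  subst hl
  exact getD_append_last _ _ _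

-- A's inner-loop correspondence with the table rows
lemma inner_lemma (processing : List (List Int)) (j : Nat) (prev : List Int) (k : Nat)
    (MA JA : List Int) (S : List (List (String × Int)))
    (hMAlen : ∀ m, m < k → m < MA.length)
    (hMA : ∀ m, MA.getD m 0 = prev.getD m 0)
    (hj : j < JA.length) (hJA : JA.getD j 0 = 0) :
    let pr := processing.getD j []
    let res := aInner processing j k (MA, JA, S)
    res.1.length = MA.length ∧
    (∀ m, res.1.getD m 0 = if m < k then (bRow pr prev k).1.getD m 0 else MA.getD m 0) ∧
    res.2.1.length = JA.length ∧
    res.2.1.getD j 0 = (bRow pr prev k).2 ∧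
    (∀ j', j' ≠ j → res.2.1.getD j' 0 = JA.getD j' 0) ∧
    res.2.2 = S ++ (List.range k).map (fun m =>
      let d := (processing.getD j []).getD m 0
      [("job", (j : Int)), ("machine", (m : Int)),
       ("start", (bRow pr prev k).1.getD m 0 - d), ("duration", d)]) := by
  intro pr
  induction k with
  | zero =>
    refine ⟨rfl, fun m => by simp [aInner], rfl, ?_, fun j' _ => rfl, by simp [aInner]⟩
    simpa [aInner, bRow] using hJA
  | succ k ih =>
    obtain ⟨h1, h2, h3, h4, h5, h6⟩ := ih (fun m hm => hMAlen m (Nat.lt_succ_of_lt hm))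
    have hstep : aInner processing j (k + 1) (MA, JA, S)
        = aStep processing j (aInner processing j k (MA, JA, S)) k := by
      simp [aInner, List.range_succ]
    set mid := aInner processing j k (MA, JA, S) with hmid
    have hkMA : mid.1.getD k 0 = prev.getD k 0 := by
      rw [h2 k, if_neg (Nat.lt_irrefl k)]; exact hMA k
    have hs : max (mid.1.getD k 0) (mid.2.1.getD j 0) + (processing.getD j []).getD k 0
        = (bRow pr prev (k + 1)).2 := by
      rw [hkMA, h4, bRow_val_succ]
    refine ⟨?_, ?_, ?_, ?_, ?_, ?_⟩
    · rw [hstep]; simp [aStep, h1]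
    · intro m
      rw [hstep]
      simp only [aStep]
      by_cases hm : m = k
      · subst hm
        have hmlt : m < mid.1.length := by rw [h1]; exact hMAlen m (Nat.lt_succ_self m)
        rw [getD_set_self _ _ _ _ hmlt, hs, if_pos (Nat.lt_succ_self m), bRow_getD_last]
      · rw [getD_set_ne _ _ _ _ _ (fun h => hm h.symm)]
        rcases Nat.lt_or_ge m k with hlt | hge
        · rw [h2 m, if_pos hlt, if_pos (Nat.lt_succ_of_lt hlt), bRow_getD_mono _ _ _ _ hlt]
        · rw [h2 m, if_neg (by omega), if_neg (by omega)]
    · rw [hstep]; simp [aStep, h3]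
    · rw [hstep]
      simp only [aStep]
      have hjlt : j < mid.2.1.length := by rw [h3]; exact hj
      rw [getD_set_self _ _ _ _ hjlt]
      exact hs
    · intro j' hne
      rw [hstep]
      simp only [aStep]
      rw [getD_set_ne _ _ _ _ _ (fun h => hne h.symm)]
      exact h5 j' hne
    · rw [hstep]
      simp only [aStep, h6, List.range_succ, List.map_append, List.map_cons, List.map_nil,
        List.append_assoc]
      congr 1
      have hstart : max (mid.1.getD k 0) (mid.2.1.getD j 0)
          = (bRow pr prev (k + 1)).1.getD k 0 - (processing.getD j []).getD k 0 := by
        rw [bRow_getD_last, ← hs]; ring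
      rw [hstart]
      congr 1
      apply List.map_congr_left
      intro m hm
      have hm' : m < k := List.mem_range.mp hm
      have hmono := bRow_getD_mono pr prev k m hm'
      simp only [List.getD] at hmono
      simp [hmono]

lemma bTable_succ (processing : List (List Int)) (machines jn : Nat) :
    bTable processing machines (jn + 1)
      = ((bTable processing machines jn).1 ++ [rowOf processing machines jn],
         rowOf processing machines jn) := by
  simp only [bTable, List.range_succ, List.foldl_append, List.foldl_cons, List.foldl_nil]
  rfl

lemma rowOf_getD_zero (processing : List (List Int)) (machines j m : Nat)
    (h : machines ≤ m) : (rowOf processing machines j).getD m 0 = 0 := by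
  exact getD_oob _ _ _ (by rw [rowOf, bRow_length]; exact h)

lemma prev_getD_zero (processing : List (List Int)) (machines jn m : Nat)
    (h : machines ≤ m) : (bTable processing machines jn).2.getD m 0 = 0 := by
  cases jn with
  | zero => rfl
  | succ jn => rw [bTable_succ]; exact rowOf_getD_zero processing machines jn m h

-- A's outer-loop correspondence: A's schedule, written against the table rows
lemma outer_lemma (processing : List (List Int)) (machines jn : Nat)
    (hjn : jn ≤ processing.length) :
    let res := (List.range jn).foldl (fun acc j => aInner processing j machines acc)
      (List.replicate machines (0 : Int), List.replicate processing.length (0 : Int), [])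
    res.1.length = machines ∧
    (∀ m, res.1.getD m 0 = (bTable processing machines jn).2.getD m 0) ∧
    res.2.1.length = processing.length ∧
    (∀ j', jn ≤ j' → res.2.1.getD j' 0 = 0) ∧
    res.2.2 = (List.range jn).flatMap (fun j =>
      (List.range machines).map (fun m =>
        let d := (processing.getD j []).getD m 0
        [("job", (j : Int)), ("machine", (m : Int)),
         ("start", (rowOf processing machines j).getD m 0 - d), ("duration", d)])) := by
  induction jn with
  | zero =>
    refine ⟨by simp, fun m => ?_, by simp, fun j' _ => getD_replicate0 _ _, by simp⟩
    simp [bTable]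
  | succ jn ih =>
    obtain ⟨h1, h2, h3, h4, h5⟩ := ih (Nat.le_of_succ_le hjn)
    set mid := (List.range jn).foldl (fun acc j => aInner processing j machines acc)
      (List.replicate machines (0 : Int), List.replicate processing.length (0 : Int), [])
      with hmid
    have hstep : (List.range (jn + 1)).foldl (fun acc j => aInner processing j machines acc)
        (List.replicate machines (0 : Int), List.replicate processing.length (0 : Int), [])
        = aInner processing jn machines mid := by
      rw [hmid]
      simp [List.range_succ]
    have hinner := inner_lemma processing jn (bTable processing machines jn).2 machines
      mid.1 mid.2.1 mid.2.2 (fun m hm => by rw [h1]; exact hm) h2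
      (by rw [h3]; omega) (h4 jn (Nat.le_refl jn))
    obtain ⟨g1, g2, g3, g4, g5, g6⟩ := hinner
    rw [hstep, show mid = (mid.1, mid.2.1, mid.2.2) from rfl]
    refine ⟨by rw [g1, h1], fun m => ?_, by rw [g3, h3], fun j' hj' => ?_, ?_⟩
    · rw [g2 m]
      rcases Nat.lt_or_ge m machines with hlt | hge
      · rw [if_pos hlt, bTable_succ]
        rfl
      · rw [if_neg (Nat.not_lt.mpr hge), h2 m, prev_getD_zero _ _ _ _ hge,
          prev_getD_zero _ _ _ _ hge]
    · rw [g5 j' (by omega)]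
      exact h4 j' (by omega)
    · rw [g6, h5, List.range_succ, List.flatMap_append]
      simp only [List.flatMap_cons, List.flatMap_nil, List.append_nil]
      rfl

-- ===== the Kahn-loop correctness machinery =====

-- the value the table assigns to grid operation op (components are nonnegative on grid keys)
def CvalI (processing : List (List Int)) (machines : Nat) (op : Int × Int) : Int :=
  (rowOf processing machines op.1.toNat).getD op.2.toNat 0

def inGridP (J M : Nat) (op : Int × Int) : Prop :=
  0 ≤ op.1 ∧ op.1 < (J : Int) ∧ 0 ≤ op.2 ∧ op.2 < (M : Int)

def predsDone (P : List (Int × Int)) (op : Int × Int) : Prop :=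
  (1 ≤ op.1 → (op.1 - 1, op.2) ∈ P) ∧ (1 ≤ op.2 → (op.1, op.2 - 1) ∈ P)

def indegVal (P : List (Int × Int)) (op : Int × Int) : Int :=
  (if 1 ≤ op.1 ∧ (op.1 - 1, op.2) ∉ P then 1 else 0) +
  (if 1 ≤ op.2 ∧ (op.1, op.2 - 1) ∉ P then 1 else 0)

def KInv (processing : List (List Int)) (J M : Nat) (i : Nat)
    (indeg finish : PySem.Dict (Int × Int) Int) (ready : List (Int × Int)) : Prop :=
  i ≤ ready.length ∧
  ready.Nodup ∧
  (∀ op ∈ ready, inGridP J M op) ∧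
  (∀ op ∈ ready.take i, finish.get? op = some (CvalI processing M op)) ∧
  (∀ op, op ∉ ready.take i → finish.get? op = none) ∧
  (∀ op, indeg.contains op = true ↔ inGridP J M op) ∧
  (∀ op, inGridP J M op → indeg.getD op 0 = indegVal (ready.take i) op) ∧
  (∀ op, inGridP J M op → (op ∈ ready ↔ predsDone (ready.take i) op))

-- the recurrence of the completion-time table
lemma Cval_rec (processing : List (List Int)) (machines j m : Nat) (hm : m < machines) :
    (rowOf processing machines j).getD m 0
      = max (if j = 0 then 0 else (rowOf processing machines (j - 1)).getD m 0)
            (if m = 0 then 0 else (rowOf processing machines j).getD (m - 1) 0)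
        + (processing.getD j []).getD m 0 := by
  have hval : ∀ (pr prev : List Int) (K k : Nat), k < K →
      (bRow pr prev K).1.getD k 0 = (bRow pr prev (k + 1)).2 := by
    intro pr prev K
    induction K with
    | zero => omega
    | succ K ih =>
      intro k hk
      rcases Nat.lt_or_ge k K with hlt | hge
      · rw [bRow_getD_mono _ _ _ _ hlt]; exact ih k hlt
      · have hkK : k = K := by omega
        subst hkK; exact bRow_getD_last _ _ _
  unfold rowOf
  rw [hval _ _ machines m hm, bRow_val_succ]
  congr 1
  congr 1
  · -- the up-neighbour: previous row (or the empty row for j = 0)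
    cases j with
    | zero => simp [bTable]
    | succ j' => rw [bTable_succ]; simp [rowOf]
  · -- the left-neighbour: earlier in the same row (or 0 for m = 0)
    cases m with
    | zero => simp [bRow]
    | succ m' =>
      rw [if_neg (by omega), show m' + 1 - 1 = m' from rfl,
        hval _ _ machines m' (by omega)]

lemma kahn_complete (processing : List (List Int)) (J M : Nat)
    (i : Nat) (indeg finish : PySem.Dict (Int × Int) Int) (ready : List (Int × Int))
    (hinv : KInv processing J M i indeg finish ready) (hend : ready.length ≤ i) :
    ∀ op, inGridP J M op → finish.get? op = some (CvalI processing M op) := by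
  obtain ⟨hle, hnd, hgrid, hfin, hfin', hcont, hdeg, hready⟩ := hinv
  have htake : ready.take i = ready := List.take_of_length_le hend
  rw [htake] at hfin hready
  -- every grid operation got processed: induction on the coordinate sum
  have hmem : ∀ n : Nat, ∀ op, inGridP J M op → (op.1 + op.2).toNat ≤ n → op ∈ ready := by
    intro n
    induction n with
    | zero =>
      intro op hg hsum
      obtain ⟨ha, hb, hc, hd⟩ := hg
      refine (hready op ⟨ha, hb, hc, hd⟩).mpr ⟨fun h1 => absurd h1 (by omega),
        fun h1 => absurd h1 (by omega)⟩
    | succ n ih =>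
      intro op hg hsum
      obtain ⟨ha, hb, hc, hd⟩ := hg
      refine (hready op ⟨ha, hb, hc, hd⟩).mpr ⟨fun h1 => ?_, fun h1 => ?_⟩
      · exact ih (op.1 - 1, op.2) ⟨by omega, by omega, hc, hd⟩ (by simp <;> omega)
      · exact ih (op.1, op.2 - 1) ⟨ha, hb, by omega, by omega⟩ (by simp <;> omega)
  intro op hg
  exact hfin op (hmem (op.1 + op.2).toNat op hg (Nat.le_refl _))

-- symbolic execution of one successor step
lemma bSucc_fst_contains (st : PySem.Dict (Int × Int) Int × List (Int × Int))
    (succ x : Int × Int) : (bSucc st succ).1.contains x = st.1.contains x := by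
  unfold bSucc
  by_cases hc : st.1.contains succ
  · have hmc : (st.1.modify succ 0 (· - 1)).contains x = st.1.contains x := by
      rw [PySem.Dict.contains_modify]
      by_cases hx : x = succ
      · subst hx; simp [hc]
      · simp [hx]
    simp only [hc, if_true]
    split_ifs <;> simpa using hmc
  · simp [hc]

lemma bSucc_fst_getD (st : PySem.Dict (Int × Int) Int × List (Int × Int))
    (succ x : Int × Int) :
    (bSucc st succ).1.getD x 0
      = if x = succ ∧ st.1.contains succ = true then st.1.getD x 0 - 1
        else st.1.getD x 0 := by
  unfold bSucc
  by_cases hc : st.1.contains succ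
  · have hmg : (st.1.modify succ 0 (· - 1)).getD x 0
        = if x = succ then st.1.getD x 0 - 1 else st.1.getD x 0 := by
      rw [PySem.Dict.getD_modify]
      by_cases hx : x = succ <;> simp [hx]
    simp only [hc, if_true]
    split_ifs with h1 h2 h2 <;> simp_all
  · simp [hc]

lemma bSucc_snd (st : PySem.Dict (Int × Int) Int × List (Int × Int)) (succ : Int × Int) :
    (bSucc st succ).2
      = if st.1.contains succ = true ∧ st.1.getD succ 0 - 1 = 0 then st.2 ++ [succ]
        else st.2 := by
  unfold bSucc
  by_cases hc : st.1.contains succ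
  · have hmg : (st.1.modify succ 0 (· - 1)).getD succ 0 = st.1.getD succ 0 - 1 :=
      PySem.Dict.getD_modify_self _ _ _ _
    simp only [hc, if_true, hmg]
    by_cases hz : st.1.getD succ 0 - 1 = 0 <;> simp [hz]
  · simp [hc]

-- an element of a duplicate-free list is not among its predecessors
lemma getElem_not_mem_take (l : List (Int × Int)) (i : Nat) (h : i < l.length)
    (hnd : l.Nodup) : l[i] ∉ l.take i := by
  have hsub : (l.take (i + 1)).Nodup := hnd.sublist (List.take_sublist _ _)
  rw [List.take_succ, List.getElem?_eq_getElem h] at hsub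
  simp only [Option.toList_some] at hsub
  intro hmem
  exact (List.nodup_append.mp hsub).2.2 _ hmem _ (by simp) rfl

-- the grid has J*M elements
def gridList (J M : Nat) : List (Int × Int) :=
  ((List.range J) ×ˢ (List.range M)).map (fun ab => ((ab.1 : Int), (ab.2 : Int)))

lemma ready_length_le (J M : Nat) (ready : List (Int × Int)) (hnd : ready.Nodup)
    (hgrid : ∀ op ∈ ready, inGridP J M op) : ready.length ≤ J * M := by
  have hsub : ready ⊆ gridList J M := by
    intro op hop
    obtain ⟨ha, hb, hc, hd⟩ := hgrid op hop
    refine List.mem_map.mpr ⟨(op.1.toNat, op.2.toNat), List.mem_product.mpr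
      ⟨List.mem_range.mpr (by omega), List.mem_range.mpr (by omega)⟩, ?_⟩
    ext <;> simp <;> omega
  have hlen : (gridList J M).length = J * M := by
    simp [gridList, List.length_product]
  calc ready.length ≤ (gridList J M).length := (hnd.subperm hsub).length_le
    _ = J * M := hlen

-- one iteration of the ready-loop preserves the invariant
lemma kahn_step (processing : List (List Int)) (J M : Nat) (i : Nat)
    (indeg finish : PySem.Dict (Int × Int) Int) (ready : List (Int × Int))
    (hinv : KInv processing J M i indeg finish ready) (h : i < ready.length) :
    KInv processing J M (i + 1)
      (([(ready[i].1 + 1, ready[i].2), (ready[i].1, ready[i].2 + 1)].foldl bSucc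
        (indeg, ready)).1)
      (finish.insert ready[i]
        (max (finish.getD (ready[i].1 - 1, ready[i].2) 0)
             (finish.getD (ready[i].1, ready[i].2 - 1) 0)
          + (processing.getD ready[i].1.toNat []).getD ready[i].2.toNat 0))
      (([(ready[i].1 + 1, ready[i].2), (ready[i].1, ready[i].2 + 1)].foldl bSucc
        (indeg, ready)).2) := by
  obtain ⟨hle, hnd, hgrid, hfin, hfinN, hcont, hdeg, hready⟩ := hinv
  set op := ready[i] with hop
  have hopmem : op ∈ ready := List.getElem_mem h
  obtain ⟨ha, hbJ, hc, hdM⟩ := hgrid op hopmem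
  set P := ready.take i with hPdef
  have hopP : op ∉ P := getElem_not_mem_take ready i h hnd
  have hPsub : ∀ x ∈ P, x ∈ ready := fun x hx => List.take_subset i ready hx
  have hPgrid : ∀ x ∈ P, inGridP J M x := fun x hx => hgrid x (hPsub x hx)
  have hpreds : predsDone P op := (hready op ⟨ha, hbJ, hc, hdM⟩).mp hopmem
  -- the inserted finish value is the table value of op
  have hup : finish.getD (op.1 - 1, op.2) 0
      = if op.1.toNat = 0 then 0
        else (rowOf processing M (op.1.toNat - 1)).getD op.2.toNat 0 := by
    by_cases h1 : 1 ≤ op.1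
    · have hm := hpreds.1 h1
      rw [PySem.Dict.getD_eq_get?_getD, hfin _ hm, if_neg (by omega)]
      simp only [Option.getD_some, CvalI]
      have e : (op.1 - 1, op.2).1.toNat = op.1.toNat - 1 := by simp <;> omega
      rw [e]
    · have hnm : (op.1 - 1, op.2) ∉ P := fun hx => by
        obtain ⟨hz, -, -, -⟩ := hPgrid _ hx
        simp at hz; omega
      rw [PySem.Dict.getD_eq_get?_getD, hfinN _ hnm, if_pos (by omega)]
      rfl
  have hleft : finish.getD (op.1, op.2 - 1) 0
      = if op.2.toNat = 0 then 0
        else (rowOf processing M op.1.toNat).getD (op.2.toNat - 1) 0 := by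
    by_cases h1 : 1 ≤ op.2
    · have hm := hpreds.2 h1
      rw [PySem.Dict.getD_eq_get?_getD, hfin _ hm, if_neg (by omega)]
      simp only [Option.getD_some, CvalI]
      have e : (op.1, op.2 - 1).2.toNat = op.2.toNat - 1 := by simp <;> omega
      rw [e]
    · have hnm : (op.1, op.2 - 1) ∉ P := fun hx => by
        obtain ⟨-, -, hz, -⟩ := hPgrid _ hx
        simp at hz; omega
      rw [PySem.Dict.getD_eq_get?_getD, hfinN _ hnm, if_pos (by omega)]
      rfl
  have hsv : max (finish.getD (op.1 - 1, op.2) 0) (finish.getD (op.1, op.2 - 1) 0)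
      + (processing.getD op.1.toNat []).getD op.2.toNat 0 = CvalI processing M op := by
    rw [hup, hleft, CvalI, Cval_rec processing M op.1.toNat op.2.toNat (by omega)]
  -- the successor fold, symbolically
  set s1 : Int × Int := (op.1 + 1, op.2) with hs1d
  set s2 : Int × Int := (op.1, op.2 + 1) with hs2d
  have hs12 : s1 ≠ s2 := by
    rw [hs1d, hs2d]; intro hcontra
    have := congrArg Prod.fst hcontra; simp at this
  set st := [s1, s2].foldl bSucc (indeg, ready) with hst
  have hfold : st = bSucc (bSucc (indeg, ready) s1) s2 := rfl
  have hC : ∀ x, st.1.contains x = indeg.contains x := by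
    intro x; rw [hfold, bSucc_fst_contains, bSucc_fst_contains]
  have hG : ∀ x, st.1.getD x 0
      = if x = s1 ∧ indeg.contains s1 = true then indeg.getD x 0 - 1
        else if x = s2 ∧ indeg.contains s2 = true then indeg.getD x 0 - 1
        else indeg.getD x 0 := by
    intro x
    rw [hfold, bSucc_fst_getD, bSucc_fst_contains, bSucc_fst_getD]
    by_cases hx1 : x = s1 <;> by_cases hx2 : x = s2
    · exact absurd (hx1.symm.trans hx2) hs12
    · by_cases hg1 : indeg.contains s1 = true <;>
        simp [hx1, hx2, hg1, hs12, Ne.symm hs12]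
    · by_cases hg2 : indeg.contains s2 = true <;>
        simp [hx1, hx2, hg2, hs12, Ne.symm hs12]
    · simp [hx1, hx2]
  have hR : st.2 = ready
      ++ (if indeg.contains s1 = true ∧ indeg.getD s1 0 - 1 = 0 then [s1] else [])
      ++ (if indeg.contains s2 = true ∧ indeg.getD s2 0 - 1 = 0 then [s2] else []) := by
    rw [hfold, bSucc_snd, bSucc_fst_contains, bSucc_fst_getD, bSucc_snd]
    have hne : ¬(s2 = s1 ∧ indeg.contains s1 = true) := fun hh => hs12 hh.1.symm
    rw [if_neg hne]
    by_cases c1 : indeg.contains s1 = true ∧ indeg.getD s1 0 - 1 = 0 <;>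
      by_cases c2 : indeg.contains s2 = true ∧ indeg.getD s2 0 - 1 = 0 <;>
      simp [c1, c2]
  have hs1not : inGridP J M s1 → s1 ∉ ready := by
    intro hg1 hmem1
    have hpd := (hready s1 hg1).mp hmem1
    have hmm : (s1.1 - 1, s1.2) ∈ P := hpd.1 (by rw [hs1d]; simp <;> omega)
    have heq : (s1.1 - 1, s1.2) = op := by
      rw [hs1d]; simp
    exact hopP (heq ▸ hmm)
  have hs2not : inGridP J M s2 → s2 ∉ ready := by
    intro hg2 hmem2
    have hpd := (hready s2 hg2).mp hmem2
    have hmm : (s2.1, s2.2 - 1) ∈ P := hpd.2 (by rw [hs2d]; simp <;> omega)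
    have heq : (s2.1, s2.2 - 1) = op := by
      rw [hs2d]; simp
    exact hopP (heq ▸ hmm)
  have hP' : st.2.take (i + 1) = P ++ [op] := by
    rw [hR, List.append_assoc, List.take_append_of_le_length (by omega),
      List.take_succ, List.getElem?_eq_getElem h]
    rfl
  -- pred-of relations used below
  have hpred1 : ∀ x : Int × Int, (x.1 - 1, x.2) = op → x = s1 := by
    intro x he
    have h1 := congrArg Prod.fst he
    have h2 := congrArg Prod.snd he
    simp at h1 h2
    rw [hs1d]
    exact Prod.ext (by omega) (by simpa using h2)
  have hpred2 : ∀ x : Int × Int, (x.1, x.2 - 1) = op → x = s2 := by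
    intro x he
    have h1 := congrArg Prod.fst he
    have h2 := congrArg Prod.snd he
    simp at h1 h2
    rw [hs2d]
    exact Prod.ext (by simpa using h1) (by omega)
  refine ⟨?_, ?_, ?_, ?_, ?_, ?_, ?_, ?_⟩
  · -- i + 1 ≤ length
    rw [hR]
    simp only [List.length_append]
    omega
  · -- Nodup
    rw [hR, List.append_assoc]
    rw [List.nodup_append]
    refine ⟨hnd, ?_, ?_⟩
    · by_cases c1 : indeg.contains s1 = true ∧ indeg.getD s1 0 - 1 = 0 <;>
        by_cases c2 : indeg.contains s2 = true ∧ indeg.getD s2 0 - 1 = 0 <;>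
        simp [c1, c2, hs12]
    · intro a haR b hbl he
      subst he
      have : a = s1 ∨ a = s2 := by
        by_cases c1 : indeg.contains s1 = true ∧ indeg.getD s1 0 - 1 = 0 <;>
          by_cases c2 : indeg.contains s2 = true ∧ indeg.getD s2 0 - 1 = 0 <;>
          simp [c1, c2] at hbl <;> tauto
      rcases this with h' | h'
      · subst h'
        have c1 : inGridP J M s1 := by
          by_cases c1 : indeg.contains s1 = true ∧ indeg.getD s1 0 - 1 = 0 <;>
            by_cases c2 : indeg.contains s2 = true ∧ indeg.getD s2 0 - 1 = 0 <;>
            simp [c1, c2] at hbl <;>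
            first | exact (hcont s1).mp c1.1 | (exact absurd hbl.symm hs12) | tauto
        exact hs1not c1 haR
      · subst h'
        have c2 : inGridP J M s2 := by
          by_cases c1 : indeg.contains s1 = true ∧ indeg.getD s1 0 - 1 = 0 <;>
            by_cases c2 : indeg.contains s2 = true ∧ indeg.getD s2 0 - 1 = 0 <;>
            simp [c1, c2] at hbl <;>
            first | exact (hcont s2).mp c2.1 | (exact absurd hbl hs12) | tauto
        exact hs2not c2 haR
  · -- grid membership
    intro x hx
    rw [hR] at hx
    rcases List.mem_append.mp hx with hx | hx
    · rcases List.mem_append.mp hx with hx | hx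
      · exact hgrid x hx
      · split_ifs at hx with c1
        · simp at hx; exact hx ▸ (hcont s1).mp c1.1
        · simp at hx
    · split_ifs at hx with c2
      · simp at hx; exact hx ▸ (hcont s2).mp c2.1
      · simp at hx
  · -- finish values on processed ops
    intro x hx
    rw [hP'] at hx
    rw [PySem.Dict.get?_insert]
    rcases List.mem_append.mp hx with hx | hx
    · have hxne : x ≠ op := fun he => hopP (he ▸ hx)
      rw [if_neg hxne]
      exact hfin x hx
    · simp at hx
      subst hx
      rw [if_pos rfl, hsv]
  · -- finish is none elsewhere
    intro x hxn
    rw [hP'] at hxn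
    rw [PySem.Dict.get?_insert,
      if_neg (fun he => hxn (by rw [he]; exact List.mem_append_right _ (by simp)))]
    exact hfinN x (fun hxP => hxn (List.mem_append_left _ hxP))
  · -- contains is the grid
    intro x
    rw [hC x]
    exact hcont x
  · -- indegree values
    intro x hxg
    rw [hG x, hP']
    by_cases hx1 : x = s1
    · rw [hx1] at hxg ⊢
      rw [if_pos ⟨rfl, (hcont s1).mpr hxg⟩, hdeg s1 hxg]
      have h11 : (1 : Int) ≤ s1.1 := by rw [hs1d]; simp <;> omega
      have e1 : (s1.1 - 1, s1.2) = op := by rw [hs1d]; simp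
      have hne2 : (s1.1, s1.2 - 1) ≠ op := fun he => hs12 (hpred2 s1 he)
      unfold indegVal
      rw [e1]
      by_cases ht : (s1.1, s1.2 - 1) ∈ P <;>
        simp [hopP, h11, hne2, ht, List.mem_append]
    · by_cases hx2 : x = s2
      · rw [hx2] at hxg ⊢
        rw [if_neg (fun hh => hs12 hh.1.symm), if_pos ⟨rfl, (hcont s2).mpr hxg⟩, hdeg s2 hxg]
        have h12 : (1 : Int) ≤ s2.2 := by rw [hs2d]; simp <;> omega
        have e2 : (s2.1, s2.2 - 1) = op := by rw [hs2d]; simp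
        have hne1 : (s2.1 - 1, s2.2) ≠ op := fun he => hs12 (hpred1 s2 he).symm
        unfold indegVal
        rw [e2]
        by_cases ht : (s2.1 - 1, s2.2) ∈ P <;>
          simp [hopP, h12, hne1, ht, List.mem_append]
      · rw [if_neg (fun hh => hx1 hh.1), if_neg (fun hh => hx2 hh.1), hdeg x hxg]
        have hne1 : (x.1 - 1, x.2) ≠ op := fun he => hx1 (hpred1 x he)
        have hne2 : (x.1, x.2 - 1) ≠ op := fun he => hx2 (hpred2 x he)
        unfold indegVal
        simp [List.mem_append, hne1, hne2]
  · -- ready members are exactly the ops whose predecessors are processed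
    intro x hxg
    rw [hP']
    by_cases hx1 : x = s1
    · rw [hx1] at hxg ⊢
      have h11 : (1 : Int) ≤ s1.1 := by rw [hs1d]; simp <;> omega
      have e1 : (s1.1 - 1, s1.2) = op := by rw [hs1d]; simp
      have hne2 : (s1.1, s1.2 - 1) ≠ op := fun he => hs12 (hpred2 s1 he)
      have hL : s1 ∈ st.2 ↔ indeg.getD s1 0 - 1 = 0 := by
        rw [hR]
        constructor
        · intro hm
          rcases List.mem_append.mp hm with hm | hm
          · rcases List.mem_append.mp hm with hm | hm
            · exact absurd hm (hs1not hxg)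
            · split_ifs at hm with c1
              · exact c1.2
              · simp at hm
          · split_ifs at hm with c2
            · simp at hm; exact absurd hm hs12
            · simp at hm
        · intro hz
          exact List.mem_append.mpr (Or.inl (List.mem_append.mpr (Or.inr
            (by rw [if_pos ⟨(hcont s1).mpr hxg, hz⟩]; simp))))
      rw [hdeg s1 hxg] at hL
      refine hL.trans ?_
      unfold indegVal predsDone
      rw [e1]
      by_cases h2p : 1 ≤ s1.2 <;> by_cases ht : (s1.1, s1.2 - 1) ∈ P <;>
        simp [hopP, h11, hne2, h2p, ht, List.mem_append] <;> omega
    · by_cases hx2 : x = s2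
      · rw [hx2] at hxg ⊢
        have h12 : (1 : Int) ≤ s2.2 := by rw [hs2d]; simp <;> omega
        have e2 : (s2.1, s2.2 - 1) = op := by rw [hs2d]; simp
        have hne1 : (s2.1 - 1, s2.2) ≠ op := fun he => hs12 (hpred1 s2 he).symm
        have hL : s2 ∈ st.2 ↔ indeg.getD s2 0 - 1 = 0 := by
          rw [hR]
          constructor
          · intro hm
            rcases List.mem_append.mp hm with hm | hm
            · rcases List.mem_append.mp hm with hm | hm
              · exact absurd hm (hs2not hxg)
              · split_ifs at hm with c1
                · simp at hm; exact absurd hm.symm hs12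
                · simp at hm
            · split_ifs at hm with c2
              · exact c2.2
              · simp at hm
          · intro hz
            exact List.mem_append.mpr (Or.inr
              (by rw [if_pos ⟨(hcont s2).mpr hxg, hz⟩]; simp))
        rw [hdeg s2 hxg] at hL
        refine hL.trans ?_
        unfold indegVal predsDone
        rw [e2]
        by_cases h1p : 1 ≤ s2.1 <;> by_cases ht : (s2.1 - 1, s2.2) ∈ P <;>
          simp [hopP, h12, hne1, h1p, ht, List.mem_append] <;> omega
      · have hne1 : (x.1 - 1, x.2) ≠ op := fun he => hx1 (hpred1 x he)
        have hne2 : (x.1, x.2 - 1) ≠ op := fun he => hx2 (hpred2 x he)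
        have hL : x ∈ st.2 ↔ x ∈ ready := by
          rw [hR]
          constructor
          · intro hm
            rcases List.mem_append.mp hm with hm | hm
            · rcases List.mem_append.mp hm with hm | hm
              · exact hm
              · split_ifs at hm with c1
                · simp at hm; exact absurd hm hx1
                · simp at hm
            · split_ifs at hm with c2
              · simp at hm; exact absurd hm hx2
              · simp at hm
          · intro hm
            exact List.mem_append.mpr (Or.inl (List.mem_append.mpr (Or.inl hm)))
        refine hL.trans ((hready x hxg).trans ?_)
        unfold predsDone
        simp [List.mem_append, hne1, hne2]

lemma kahn_run (processing : List (List Int)) (J M : Nat) :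
    ∀ (fuel i : Nat) (indeg finish : PySem.Dict (Int × Int) Int) (ready : List (Int × Int)),
      KInv processing J M i indeg finish ready → J * M ≤ fuel + i →
      ∀ op, inGridP J M op →
        (kahnRun processing fuel i indeg finish ready).get? op
          = some (CvalI processing M op) := by
  intro fuel
  induction fuel with
  | zero =>
    intro i indeg finish ready hinv hfuel op hg
    have hlen := ready_length_le J M ready hinv.2.1 hinv.2.2.1
    simp only [kahnRun]
    exact kahn_complete processing J M i indeg finish ready hinv (by omega) op hg
  | succ fuel ih =>
    intro i indeg finish ready hinv hfuel op hg
    by_cases h : i < ready.length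
    · have hunf : kahnRun processing (fuel + 1) i indeg finish ready
          = kahnRun processing fuel (i + 1)
              (([(ready[i].1 + 1, ready[i].2), (ready[i].1, ready[i].2 + 1)].foldl bSucc
                (indeg, ready)).1)
              (finish.insert ready[i]
                (max (finish.getD (ready[i].1 - 1, ready[i].2) 0)
                     (finish.getD (ready[i].1, ready[i].2 - 1) 0)
                  + (processing.getD ready[i].1.toNat []).getD ready[i].2.toNat 0))
              (([(ready[i].1 + 1, ready[i].2), (ready[i].1, ready[i].2 + 1)].foldl bSucc
                (indeg, ready)).2) := by
        simp only [kahnRun]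
        rw [dif_pos h]
      rw [hunf]
      exact ih (i + 1) _ _ _
        (kahn_step processing J M i indeg finish ready hinv h) (by omega) op hg
    · simp only [kahnRun]
      rw [dif_neg h]
      exact kahn_complete processing J M i indeg finish ready hinv (by omega) op hg

-- the initial-state characterisations
def vdeg (j m : Nat) : Int := (if 0 < j then 1 else 0) + (if 0 < m then 1 else 0)

lemma bIndeg_row_get? (d : PySem.Dict (Int × Int) Int) (j M : Nat) (x : Int × Int) :
    ((List.range M).foldl (fun d (m : Nat) =>
        d.insert ((j : Int), (m : Int)) ((if j > 0 then 1 else 0) + (if m > 0 then 1 else 0))) d).get? x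
      = if x.1 = (j : Int) ∧ 0 ≤ x.2 ∧ x.2 < (M : Int) then some (vdeg j x.2.toNat)
        else d.get? x := by
  induction M with
  | zero =>
    simp only [List.range_zero, List.foldl_nil]
    rw [if_neg (by intro hc; obtain ⟨-, h2, h3⟩ := hc; simp at h3; omega)]
  | succ M ih =>
    rw [List.range_succ, List.foldl_append, List.foldl_cons, List.foldl_nil,
      PySem.Dict.get?_insert, ih]
    by_cases hx : x = ((j : Int), (M : Int))
    · subst hx
      rw [if_pos rfl,
        if_pos (show ((j : Int), (M : Int)).1 = (j : Int) ∧ 0 ≤ ((j : Int), (M : Int)).2 ∧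
          ((j : Int), (M : Int)).2 < ((M + 1 : Nat) : Int) from ⟨rfl, by simp, by push_cast; omega⟩)]
      simp [vdeg]
    · rw [if_neg hx]
      by_cases hcond : x.1 = (j : Int) ∧ 0 ≤ x.2 ∧ x.2 < ((M : Int) + 1)
      · obtain ⟨h1, h2, h3⟩ := hcond
        have hlt : x.2 < (M : Int) := by
          by_cases h4 : x.2 = (M : Int)
          · exact absurd (Prod.ext h1 h4) hx
          · omega
        rw [if_pos ⟨h1, h2, hlt⟩, if_pos ⟨h1, h2, by push_cast; omega⟩]
      · rw [if_neg (by push_cast; push_cast at hcond; omega),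
          if_neg (fun hc => hcond ⟨hc.1, hc.2.1, by push_cast; push_cast at hc; omega⟩)]

lemma bIndeg_get? (J M : Nat) (x : Int × Int) :
    (bIndeg J M).get? x
      = if 0 ≤ x.1 ∧ x.1 < (J : Int) ∧ 0 ≤ x.2 ∧ x.2 < (M : Int)
        then some (vdeg x.1.toNat x.2.toNat) else none := by
  unfold bIndeg
  induction J with
  | zero =>
    simp only [List.range_zero, List.foldl_nil, PySem.Dict.get?_empty]
    rw [if_neg (by intro hc; obtain ⟨h1, h2, -⟩ := hc; simp at h2; omega)]
  | succ J ih =>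
    rw [List.range_succ, List.foldl_append, List.foldl_cons, List.foldl_nil,
      bIndeg_row_get?, ih]
    by_cases hx : x.1 = (J : Int) ∧ 0 ≤ x.2 ∧ x.2 < (M : Int)
    · rw [if_pos hx, if_pos (by push_cast; omega)]
      have : x.1.toNat = J := by omega
      rw [this]
    · rw [if_neg hx]
      by_cases hg : 0 ≤ x.1 ∧ x.1 < (J : Int) ∧ 0 ≤ x.2 ∧ x.2 < (M : Int)
      · rw [if_pos hg, if_pos (by push_cast at hg ⊢; omega)]
      · rw [if_neg hg, if_neg (by push_cast at hx hg ⊢; omega)]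

lemma nodup_keys_bIndeg (J M : Nat) : (bIndeg J M).keys.Nodup := by
  unfold bIndeg
  induction J with
  | zero => exact PySem.Dict.nodup_keys_empty
  | succ J ih =>
    rw [List.range_succ, List.foldl_append, List.foldl_cons, List.foldl_nil]
    exact PySem.Dict.nodup_keys_foldl_insert_key _ _ _ _ ih

lemma kahn_init (processing : List (List Int)) (J M : Nat) :
    KInv processing J M 0 (bIndeg J M) PySem.Dict.empty
      (((bIndeg J M).items.filter (fun kv => kv.2 == 0)).map (fun kv => kv.1)) := by
  have hnk := nodup_keys_bIndeg J M
  set r0 := ((bIndeg J M).items.filter (fun kv => kv.2 == 0)).map (fun kv => kv.1) with hr0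
  have hmem : ∀ x, x ∈ r0 ↔ (bIndeg J M).get? x = some 0 := by
    intro x
    rw [hr0]
    constructor
    · intro hx
      obtain ⟨kv, hkv, hfst⟩ := List.mem_map.mp hx
      obtain ⟨hkvm, hz⟩ := List.mem_filter.mp hkv
      have hkv2 : (kv.1, kv.2) ∈ (bIndeg J M).items := by simpa using hkvm
      have := PySem.Dict.get?_of_mem_items _ hkv2 hnk
      rw [← hfst, this]
      simpa using hz
    · intro hx
      exact List.mem_map.mpr ⟨(x, 0),
        List.mem_filter.mpr ⟨PySem.Dict.mem_items_of_get?_eq_some _ hx, by simp⟩, rfl⟩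
  have hr0nd : r0.Nodup := by
    have hsub : List.Sublist r0 (bIndeg J M).keys :=
      List.Sublist.map _ List.filter_sublist
    exact hnk.sublist hsub
  refine ⟨Nat.zero_le _, hr0nd, ?_, ?_, ?_, ?_, ?_, ?_⟩
  · intro op hop
    have := (hmem op).mp hop
    rw [bIndeg_get?] at this
    by_cases hg : 0 ≤ op.1 ∧ op.1 < (J : Int) ∧ 0 ≤ op.2 ∧ op.2 < (M : Int)
    · exact hg
    · rw [if_neg hg] at this; exact absurd this (by simp)
  · intro op hop; simp at hop
  · intro op _; exact PySem.Dict.get?_empty op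
  · intro op; rw [PySem.Dict.contains_eq_isSome_get?, bIndeg_get?]
    by_cases hg : 0 ≤ op.1 ∧ op.1 < (J : Int) ∧ 0 ≤ op.2 ∧ op.2 < (M : Int) <;>
      simp [inGridP, hg]
  · intro op hg
    obtain ⟨ha, hb, hc, hd⟩ := hg
    rw [PySem.Dict.getD_eq_get?_getD, bIndeg_get?, if_pos ⟨ha, hb, hc, hd⟩]
    simp [indegVal, vdeg]
    split_ifs <;> omega
  · intro op hg
    obtain ⟨ha, hb, hc, hd⟩ := hg
    rw [hmem op, bIndeg_get?, if_pos ⟨ha, hb, hc, hd⟩]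
    simp only [List.take_zero, predsDone, List.not_mem_nil]
    constructor
    · intro hv
      have : vdeg op.1.toNat op.2.toNat = 0 := by simpa using hv
      unfold vdeg at this
      constructor <;> intro h1 <;> split_ifs at this <;> omega
    · intro ⟨h1, h2⟩
      have e1 : op.1.toNat = 0 := by
        by_cases hx : 1 ≤ op.1
        · exact (h1 hx).elim
        · omega
      have e2 : op.2.toNat = 0 := by
        by_cases hx : 1 ≤ op.2
        · exact (h2 hx).elim
        · omega
      rw [e1, e2]
      simp [vdeg]

theorem ports_agree (processing : List (List Int)) :
    build_sequential_schedule processing = build_sequential_schedule_alt processing := by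
  unfold build_sequential_schedule build_sequential_schedule_alt
  simp only
  set machines := if processing.length > 0 then (processing.getD 0 []).length else 0 with hM
  obtain ⟨-, -, -, -, h5⟩ := outer_lemma processing machines processing.length (Nat.le_refl _)
  rw [h5]
  apply List.flatMap_congr
  intro j hj
  apply List.map_congr_left
  intro m hm
  simp only
  have hget := kahn_run processing processing.length machines (processing.length * machines) 0
    _ _ _ (kahn_init processing processing.length machines) (by omega)
    ((j : Int), (m : Int))
    ⟨by simp, by simpa using (Int.ofNat_lt.mpr (List.mem_range.mp hj)), by simp,
     by simpa using (Int.ofNat_lt.mpr (List.mem_range.mp hm))⟩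
  rw [PySem.Dict.getD_eq_get?_getD, hget]
  simp [CvalI]

-- ===== VERDICT (by name: the statement is the Claim_ definition above) =====
theorem build_sequential_schedule_spec : Claim_equal_build_sequential_schedule := by
  intro processing _ _
  unfold Spec_build_sequential_schedule
  exact ports_agree processing
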